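-- pv_equiv track=rewrite | github.com/bakabaka9405/2025-sysu-ai-lab | lab3/assignment2/src/util.py | inverse_cantor_expansion
-- ===== SOURCE A (Python) =====
-- fact: list[int] = [1, 1, 2, 6, 24, 120, 720, 5040, 40320, 362880, 3628800, 39916800, 479001600, 6227020800, 87178291200, 1307674368000]
--
-- def inverse_cantor_expansion(code: int) -> list[int]:
-- 	"""
-- 	逆康托展开
-- 	"""
-- 	res = [0] * 16
-- 	num = list(range(16))
-- 	for i in range(16):
-- 		index = code // fact[15 - i]
-- 		res[i] = num.pop(index)
-- 		code %= fact[15 - i]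
-- 	return res
-- ===== SOURCE B (Python) =====
-- fact: list[int] = [1, 1, 2, 6, 24, 120, 720, 5040, 40320, 362880, 3628800, 39916800, 479001600, 6227020800, 87178291200, 1307674368000]
--
-- def inverse_cantor_expansion(code: int) -> list[int]:
-- 	"""
-- 	Inverse Cantor expansion: fixed-size used-flag array instead of a
-- 	shrinking list with pop; digits via divmod.
-- 	"""
-- 	used = [False] * 16
-- 	res = []
-- 	for f in reversed(fact):
-- 		index, code = divmod(code, f)
-- 		avail = [v for v in range(16) if not used[v]]
-- 		pick = avail[index]
-- 		used[pick] = True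
-- 		res.append(pick)
-- 	return res
-- ===== Notes on version B (the rewrite author's own statement) =====
-- stated objective: idiomatic
-- what changed: Replaces the shrinking list with num.pop(index) and a preallocated result by a fixed-size boolean used-array: each step splits code with divmod, rebuilds the list of still-unused numbers by a comprehension, indexes it, and appends to the result.
import Mathlib
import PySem

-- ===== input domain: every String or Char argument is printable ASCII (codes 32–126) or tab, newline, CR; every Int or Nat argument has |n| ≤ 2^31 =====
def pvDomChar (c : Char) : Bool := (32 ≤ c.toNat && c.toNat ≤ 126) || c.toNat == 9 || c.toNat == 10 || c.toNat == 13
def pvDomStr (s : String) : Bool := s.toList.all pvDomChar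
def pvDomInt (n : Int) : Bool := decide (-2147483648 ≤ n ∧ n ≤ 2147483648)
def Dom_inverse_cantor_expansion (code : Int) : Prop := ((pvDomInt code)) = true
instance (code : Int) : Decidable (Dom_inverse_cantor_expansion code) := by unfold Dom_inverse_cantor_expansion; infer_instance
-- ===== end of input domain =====

-- B replaces A's shrinking list with num.pop(index) by a fixed-size used-flag array:
-- digits via divmod, the still-unused numbers rebuilt by a comprehension and indexed,
-- the result appended (idiomatic restructuring, same cost; equal on all of Dom).

-- ===== PORT A =====
-- the module-level constant `fact`
def icFact : List Int := [1, 1, 2, 6, 24, 120, 720, 5040, 40320, 362880, 3628800, 39916800, 479001600, 6227020800, 87178291200, 1307674368000]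

-- loop body of A; state none = IndexError already raised (never happens on Dom);
-- state some (res, num, code) as in the Python
def icStepA (st : Option (List Int × List Int × Int)) (i : Int) :
    Option (List Int × List Int × Int) :=
  match st with
  | none => none
  | some (res, num, c) =>
    let f := PySem.List.pyGetD icFact (15 - i) 0   -- fact[15 - i]; 15 - i always in range
    match PySem.List.pop? num (PySem.Int.floordiv c f) with
    | none => none                                  -- num.pop(index): IndexError
    | some (x, num') => some (PySem.List.pySetD res i x, num', PySem.Int.mod c f)

def inverse_cantor_expansion (code : Int) : List Int :=
  match (PySem.List.pyRange 0 16 1).foldl icStepA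
      (some (List.replicate 16 (0:Int), PySem.List.pyRange 0 16 1, code)) with
  | some (res, _, _) => res
  | none => []                                      -- IndexError (outside Dom only)

-- ===== PORT B =====
-- [v for v in range(16) if not used[v]]
def icAvail (used : List Bool) : List Int :=
  (PySem.List.pyRange 0 16 1).filter (fun v => !(PySem.List.pyGetD used v false))

-- loop body of B; state some (used, res, code)
def icStepB (st : Option (List Bool × List Int × Int)) (f : Int) :
    Option (List Bool × List Int × Int) :=
  match st with
  | none => none
  | some (used, res, c) =>
    match PySem.Int.divmod? c f with
    | none => none
    | some (index, c') =>
      match PySem.List.pyGet? (icAvail used) index with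
      | none => none                                -- avail[index]: IndexError
      | some pick => some (PySem.List.pySetD used pick true, res ++ [pick], c')

def inverse_cantor_expansion_alt (code : Int) : List Int :=
  match icFact.reverse.foldl icStepB
      (some (List.replicate 16 false, ([] : List Int), code)) with
  | some (_, res, _) => res
  | none => []

-- ===== PRECONDITION & SPEC =====
def Spec_inverse_cantor_expansion (code : Int) (out : List Int) : Prop := out = inverse_cantor_expansion_alt code
instance (code : Int) (out : List Int) : Decidable (Spec_inverse_cantor_expansion code out) := by unfold Spec_inverse_cantor_expansion; infer_instance

-- ===== CLAIM (what is proved, stated in full; the proofs are below) =====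
def Claim_equal_inverse_cantor_expansion : Prop := ∀ (code : Int), Dom_inverse_cantor_expansion code → Spec_inverse_cantor_expansion code (inverse_cantor_expansion code)

-- ===== LEMMAS AND PROOFS =====

theorem ic_eraseIdx_eq_erase {α : Type} [DecidableEq α] (A : List α) (j : Nat) (h : j < A.length) (hnd : A.Nodup) : A.eraseIdx j = A.erase A[j] := by
  induction A generalizing j with
  | nil => simp at h
  | cons x xs ih =>
    cases j with
    | zero => simp
    | succ j =>
      have hx : x ∉ xs := (List.nodup_cons.mp hnd).1
      have hj : j < xs.length := by simpa using h
      have hne : (x == xs[j]) = false := by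
        simp only [beq_eq_false_iff_ne]
        intro he; exact hx (he ▸ xs.getElem_mem hj)
      simp [List.eraseIdx_cons_succ, hne, ih j hj (List.nodup_cons.mp hnd).2]

theorem ic_avail_nodup (used : List Bool) : (icAvail used).Nodup :=
  (PySem.List.nodup_pyRange_one 0 16).filter _

theorem ic_avail_mem {used : List Bool} {v : Int} (h : v ∈ icAvail used) :
    0 ≤ v ∧ v < 16 := by
  have := (List.mem_filter.mp h).1
  exact PySem.List.mem_pyRange_one.mp this

theorem ic_avail_set (used : List Bool) (hu : used.length = 16) (j : Nat)
    (hj : j < (icAvail used).length) :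
    icAvail (PySem.List.pySetD used ((icAvail used)[j]) true) = (icAvail used).eraseIdx j := by
  set A := icAvail used with hA
  set pick := A[j] with hpick
  have hmem : pick ∈ A := A.getElem_mem hj
  obtain ⟨hp0, hp16⟩ := ic_avail_mem hmem
  have hset : PySem.List.pySetD used pick true = used.set pick.toNat true :=
    PySem.List.pySetD_of_nonneg used true hp0
  have hstep : icAvail (PySem.List.pySetD used pick true)
      = A.filter (fun v => v != pick) := by
    rw [hset]
    have h1 : icAvail (used.set pick.toNat true)
        = (PySem.List.pyRange 0 16 1).filter
            (fun v => (v != pick) && !(PySem.List.pyGetD used v false)) := by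
      apply List.filter_congr
      intro v hv
      obtain ⟨hv0, hv16⟩ := PySem.List.mem_pyRange_one.mp hv
      have hvlen : v < ((used.set pick.toNat true).length : Int) := by
        simp [hu]; omega
      have hvlen' : v < (used.length : Int) := by simp [hu]; omega
      rw [PySem.List.pyGetD_eq_getElem _ _ hv0 hvlen,
          PySem.List.pyGetD_eq_getElem _ _ hv0 hvlen']
      have hvl : v.toNat < used.length := by omega
      rw [List.getElem_set]
      by_cases hvp : v = pick
      · have : pick.toNat = v.toNat := by omega
        simp [hvp, this]
      · have : pick.toNat ≠ v.toNat := by omega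
        simp [this, hvp]
    rw [h1, ← List.filter_filter]
    rfl
  rw [hstep, ic_eraseIdx_eq_erase A j hj (ic_avail_nodup used),
    (ic_avail_nodup used).erase_eq_filter pick]

theorem ic_fact_get (n : Nat) (h : n < 16) :
    PySem.List.pyGetD icFact (n : Int) 0 = (n.factorial : Int) := by
  interval_cases n <;> decide

theorem ic_drop (n : Nat) (h : n < 16) :
    icFact.reverse.drop (15 - n) = (n.factorial : Int) :: icFact.reverse.drop (16 - n) := by
  interval_cases n <;> decide

theorem ic_main (n : Nat) (hn : n ≤ 16) : ∀ (c : Int) (used : List Bool) (resb : List Int),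
    used.length = 16 →
    (icAvail used).length = n →
    0 ≤ c → c < (Nat.factorial n : Int) →
    resb.length = 16 - n →
    ∃ (R : List Int) (t1 : List Int × Int) (t2 : List Bool × Int),
      (PySem.List.pyRange (16 - (n:Int)) 16 1).foldl icStepA
        (some (resb ++ List.replicate n (0:Int), icAvail used, c)) = some (R, t1) ∧
      (icFact.reverse.drop (16 - n)).foldl icStepB (some (used, resb, c)) = some (t2.1, R, t2.2) := by
  induction n with
  | zero =>
    intro c used resb hu hlen hc0 hc1 hres
    refine ⟨resb, (icAvail used, c), (used, c), ?_, ?_⟩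
    · rw [PySem.List.pyRange_one_eq_nil (by norm_num)]
      simp
    · have h16 : icFact.reverse.drop 16 = [] := by decide
      simpa using congrArg (fun l => l.foldl icStepB (some (used, resb, c))) h16
  | succ n ih =>
    intro c used resb hu hlen hc0 hc1 hres
    have hn15 : n < 16 := by omega
    have hfpos : (0:Int) < (n.factorial : Int) := by exact_mod_cast n.factorial_pos
    set A := icAvail used with hAdef
    set f : Int := (n.factorial : Int) with hfdef
    set idx : Int := PySem.Int.floordiv c f with hidxdef
    have hidx0 : 0 ≤ idx := by
      rw [hidxdef]
      exact (PySem.Int.le_floordiv_iff_mul_le hfpos).mpr (by simpa using hc0)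
    have hidx1 : idx < (n:Int) + 1 := by
      rw [hidxdef]
      refine (PySem.Int.floordiv_lt_iff_lt_mul hfpos).mpr ?_
      have : (Nat.factorial (n+1) : Int) = ((n:Int)+1) * f := by
        rw [hfdef]; push_cast [Nat.factorial_succ]; ring
      rw [← this]; exact_mod_cast hc1
    set j : Nat := idx.toNat with hjdef
    have hjA : j < A.length := by omega
    have hcast : ((j : Nat) : Int) = idx := Int.toNat_of_nonneg hidx0
    set pick : Int := A[j] with hpickdef
    have hpop : PySem.List.pop? A idx = some (pick, A.eraseIdx j) := by
      rw [← hcast]; exact PySem.List.pop?_natCast A j hjA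
    have hget : PySem.List.pyGet? A idx = some pick := by
      rw [← hcast, PySem.List.pyGet?_natCast]
      exact List.getElem?_eq_getElem hjA
    have hfne : f ≠ 0 := by omega
    have hdm : PySem.Int.divmod? c f = some (idx, PySem.Int.mod c f) := by
      simp [PySem.Int.divmod?, hfne, hidxdef, PySem.Int.floordiv, PySem.Int.mod]
    -- the loop index of this iteration
    set i : Int := 16 - ((n+1 : Nat) : Int) with hidef
    have hi15 : (15 : Int) - i = (n : Int) := by rw [hidef]; push_cast; omega
    have hi0 : 0 ≤ i := by rw [hidef]; push_cast; omega
    have hitoNat : i.toNat = 15 - n := by rw [hidef]; push_cast; omega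
    have hressucc : resb.length = 15 - n := by omega
    have hset : (resb ++ List.replicate (n+1) (0:Int)).set (15-n) pick
        = (resb ++ [pick]) ++ List.replicate n 0 := by
      rw [List.replicate_succ, List.set_append, if_neg (by omega)]
      have h0 : 15 - n - resb.length = 0 := by omega
      simp [h0]
    have hstepA : icStepA (some (resb ++ List.replicate (n+1) (0:Int), A, c)) i
        = some ((resb ++ [pick]) ++ List.replicate n 0, A.eraseIdx j, PySem.Int.mod c f) := by
      simp only [icStepA]
      rw [hi15, ic_fact_get n hn15, ← hfdef, ← hidxdef, hpop]
      dsimp only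
      rw [PySem.List.pySetD_of_nonneg _ _ hi0, hitoNat, hset]
    have hused' : icAvail (PySem.List.pySetD used pick true) = A.eraseIdx j := by
      exact ic_avail_set used hu j hjA
    have hstepB : icStepB (some (used, resb, c)) f
        = some (PySem.List.pySetD used pick true, resb ++ [pick], PySem.Int.mod c f) := by
      simp only [icStepB]
      rw [hdm]
      dsimp only
      rw [← hAdef, hget]
    -- apply the induction hypothesis
    obtain ⟨R, t1, t2, hA', hB'⟩ :=
      ih (by omega) (PySem.Int.mod c f) (PySem.List.pySetD used pick true) (resb ++ [pick])
        (by rw [PySem.List.length_pySetD]; exact hu)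
        (by rw [hused', List.length_eraseIdx, if_pos hjA, hlen]; omega)
        (PySem.Int.mod_nonneg c hfpos)
        (PySem.Int.mod_lt c hfpos)
        (by simp [hressucc]; omega)
    refine ⟨R, t1, t2, ?_, ?_⟩
    · have hpeel : PySem.List.pyRange (16 - ((n+1 : Nat):Int)) 16 1
          = i :: PySem.List.pyRange (16 - (n:Int)) 16 1 := by
        rw [← hidef, PySem.List.pyRange_one_cons (show i < 16 by rw [hidef]; push_cast; omega),
          show i + 1 = 16 - (n:Int) from by rw [hidef]; push_cast; omega]
      rw [hpeel, List.foldl_cons, hstepA, ← hused']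
      exact hA'
    · have hd : 16 - (n+1) = 15 - n := by omega
      rw [hd, ic_drop n hn15, List.foldl_cons, ← hfdef, hstepB]
      exact hB'

theorem ic_spec : ∀ (code : Int), Dom_inverse_cantor_expansion code →
    inverse_cantor_expansion code = inverse_cantor_expansion_alt code := by
  intro code hdom
  have hdom' : -2147483648 ≤ code ∧ code ≤ 2147483648 := by
    simpa [Dom_inverse_cantor_expansion, pvDomInt] using hdom
  by_cases hc : 0 ≤ code
  · -- nonnegative code: the whole run is covered by ic_main with n = 16
    have hf16 : (Nat.factorial 16 : Int) = 20922789888000 := by norm_num [Nat.factorial]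
    obtain ⟨R, t1, t2, hA, hB⟩ := ic_main 16 (by omega) code (List.replicate 16 false) []
      (by decide) (by decide) hc (by omega) (by decide)
    rw [show (16:Int) - ((16:Nat):Int) = 0 by norm_num] at hA
    simp only [List.nil_append,
      show icAvail (List.replicate 16 false) = PySem.List.pyRange 0 16 1 from by decide] at hA
    simp only [Nat.sub_self, List.drop_zero] at hB
    unfold inverse_cantor_expansion inverse_cantor_expansion_alt
    rw [hA, hB]
  · -- negative code: first iteration picks 15 (pop(-1) / avail[-1]), rest by ic_main with n = 15
    have hcneg : code < 0 := by omega
    have hidx : PySem.Int.floordiv code 1307674368000 = -1 := by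
      refine (PySem.Int.floordiv_eq_iff_of_pos (by norm_num)).mpr ?_
      constructor <;> omega
    have hmod : PySem.Int.mod code 1307674368000 = code + 1307674368000 := by
      have := PySem.Int.floordiv_mul_add_mod code 1307674368000
      rw [hidx] at this; omega
    have hpop : PySem.List.pop? (PySem.List.pyRange 0 16 1) (-1)
        = some (15, ([0,1,2,3,4,5,6,7,8,9,10,11,12,13,14] : List Int)) := by
      rw [show PySem.List.pyRange 0 16 1
            = ([0,1,2,3,4,5,6,7,8,9,10,11,12,13,14] : List Int) ++ [15] from by decide]
      exact PySem.List.pop?_last _ _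
    have hstepA0 : icStepA (some (List.replicate 16 (0:Int), PySem.List.pyRange 0 16 1, code)) 0
        = some ([15] ++ List.replicate 15 (0:Int),
            icAvail (PySem.List.pySetD (List.replicate 16 false) 15 true),
            code + 1307674368000) := by
      simp only [icStepA]
      rw [show (15:Int) - 0 = 15 by norm_num,
        show PySem.List.pyGetD icFact (15:Int) 0 = 1307674368000 by decide,
        hidx, hpop]
      dsimp only
      rw [hmod,
        show PySem.List.pySetD (List.replicate 16 (0:Int)) 0 15
          = [15] ++ List.replicate 15 (0:Int) from by decide,
        show ([0,1,2,3,4,5,6,7,8,9,10,11,12,13,14] : List Int)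
          = icAvail (PySem.List.pySetD (List.replicate 16 false) 15 true) from by decide]
    have hstepB0 : icStepB (some (List.replicate 16 false, ([] : List Int), code)) 1307674368000
        = some (PySem.List.pySetD (List.replicate 16 false) 15 true, ([15] : List Int),
            code + 1307674368000) := by
      simp only [icStepB]
      rw [show PySem.Int.divmod? code 1307674368000
            = some (PySem.Int.floordiv code 1307674368000, PySem.Int.mod code 1307674368000) from by
          simp [PySem.Int.divmod?, PySem.Int.floordiv, PySem.Int.mod],
        hidx, hmod]
      dsimp only
      rw [show PySem.List.pyGet? (icAvail (List.replicate 16 false)) (-1) = some 15 from by decide]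
      rfl
    have hf15 : (Nat.factorial 15 : Int) = 1307674368000 := by norm_num [Nat.factorial]
    obtain ⟨R, t1, t2, hA, hB⟩ := ic_main 15 (by omega) (code + 1307674368000)
      (PySem.List.pySetD (List.replicate 16 false) 15 true) [15]
      (by decide) (by decide) (by omega) (by omega) (by decide)
    rw [show (16:Int) - ((15:Nat):Int) = 1 by norm_num] at hA
    rw [show 16 - 15 = 1 by omega] at hB
    unfold inverse_cantor_expansion inverse_cantor_expansion_alt
    set initA := some (List.replicate 16 (0:Int), PySem.List.pyRange 0 16 1, code) with hinitA
    rw [show PySem.List.pyRange 0 16 1 = 0 :: PySem.List.pyRange 1 16 1 from by decide,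
      List.foldl_cons, hinitA, hstepA0]
    rw [show icFact.reverse = 1307674368000 :: List.drop 1 icFact.reverse from by decide,
      List.foldl_cons, hstepB0]
    rw [hA, hB]

-- ===== VERDICT (by name: the statement is the Claim_ definition above) =====
theorem inverse_cantor_expansion_spec : Claim_equal_inverse_cantor_expansion := by
  intro code hdom
  show inverse_cantor_expansion code = inverse_cantor_expansion_alt code
  exact ic_spec code hdom
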